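-- pv_equiv track=rewrite | github.com/revjkee/aethernova | core-systems/engine-core/engine/net/snapshot_delta.py | update_ack_bits
-- ===== SOURCE A (Python) =====
-- from typing import Any, Dict, List, Optional, Tuple, Union, Iterable
--
-- def update_ack_bits(latest: int, seen: Iterable[int], bits: int = 32, seq_bits: int = 16) -> int:
--     """Build ack_bits where bit 0 => (latest-1), bit 31 => (latest-32)."""
--     window = 0
--     mask = (1 << seq_bits) - 1
--     seen_set = {x & mask for x in seen}
--     for i in range(1, bits + 1):
--         s = (latest - i) & mask
--         if s in seen_set:
--             window |= 1 << (i - 1)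
--     return window
-- ===== SOURCE B (Python) =====
-- def update_ack_bits(latest: int, seen, bits: int = 32, seq_bits: int = 16) -> int:
--     """Mark each acked sequence's bit directly instead of probing all `bits` window positions."""
--     window = 0
--     period = 1 << seq_bits
--     mask = period - 1
--     for x in seen:
--         i = (latest - x) & mask
--         if i == 0:
--             i = period
--         while i <= bits:
--             window |= 1 << (i - 1)
--             i += period
--     return window
-- ===== Notes on version B (the rewrite author's own statement) =====
-- stated objective: alternative
-- what changed: B drops A's membership set and its probe loop over all `bits` window positions: it iterates once over `seen` and, for each acked sequence, sets the corresponding window bit(s) directly, stepping by the sequence period 2**seq_bits.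
import Mathlib
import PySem

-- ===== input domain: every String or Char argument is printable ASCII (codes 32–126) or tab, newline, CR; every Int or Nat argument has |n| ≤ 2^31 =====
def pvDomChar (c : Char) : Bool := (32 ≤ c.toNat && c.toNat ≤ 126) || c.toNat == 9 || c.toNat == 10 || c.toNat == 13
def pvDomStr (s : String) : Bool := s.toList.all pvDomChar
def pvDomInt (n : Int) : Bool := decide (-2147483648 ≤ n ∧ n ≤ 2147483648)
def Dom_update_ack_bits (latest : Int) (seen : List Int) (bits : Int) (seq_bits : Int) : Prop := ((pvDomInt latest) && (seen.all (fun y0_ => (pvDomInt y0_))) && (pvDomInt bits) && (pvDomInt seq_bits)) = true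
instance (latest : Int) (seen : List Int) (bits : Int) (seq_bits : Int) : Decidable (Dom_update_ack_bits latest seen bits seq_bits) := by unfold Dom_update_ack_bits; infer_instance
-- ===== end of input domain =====

-- B marks each acked sequence's window bit(s) directly in one pass over `seen`
-- instead of probing every one of the `bits` window positions against a membership set.

-- ===== PORT A =====
def update_ack_bits (latest : Int) (seen : List Int) (bits : Int) (seq_bits : Int) : Int :=
  let mask : Int := (1 <<< seq_bits.toNat) - 1
  let seen_set : PySem.Set Int := PySem.Set.ofList (seen.map (fun x => PySem.Int.band x mask))
  (PySem.List.pyRange 1 (bits + 1) 1).foldl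
    (fun window i =>
      let s := PySem.Int.band (latest - i) mask
      if s ∈ seen_set then PySem.Int.bor window (1 <<< (i - 1).toNat) else window)
    0

-- ===== PORT B =====
-- the `while i <= bits: window |= 1 << (i-1); i += period` loop of Source B
-- (the `0 < period` guard only makes the recursion total; Python's period = 1 << seq_bits is always positive)
def markFrom (bits period : Int) (i : Int) (window : Int) : Int :=
  if h : i ≤ bits ∧ 0 < period then
    markFrom bits period (i + period) (PySem.Int.bor window (1 <<< (i - 1).toNat))
  else window
termination_by (bits + 1 - i).toNat
decreasing_by omega

def update_ack_bits_alt (latest : Int) (seen : List Int) (bits : Int) (seq_bits : Int) : Int :=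
  let period : Int := 1 <<< seq_bits.toNat
  let mask : Int := period - 1
  seen.foldl (fun window x =>
    let i := PySem.Int.band (latest - x) mask
    markFrom bits period (if i = 0 then period else i) window) 0

-- ===== PRECONDITION & SPEC =====
-- Pre_ excludes seq_bits < 0, on which Python A raises ValueError at `1 << seq_bits`.
def Pre_update_ack_bits (latest : Int) (seen : List Int) (bits : Int) (seq_bits : Int) : Prop := 0 ≤ seq_bits
instance (latest : Int) (seen : List Int) (bits : Int) (seq_bits : Int) : Decidable (Pre_update_ack_bits latest seen bits seq_bits) := by unfold Pre_update_ack_bits; infer_instance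
def pvWitness_update_ack_bits : Int × List Int × Int × Int := (5, [3, 4], 32, 16)

def Spec_update_ack_bits (latest : Int) (seen : List Int) (bits : Int) (seq_bits : Int) (out : Int) : Prop := out = update_ack_bits_alt latest seen bits seq_bits
instance (latest : Int) (seen : List Int) (bits : Int) (seq_bits : Int) (out : Int) : Decidable (Spec_update_ack_bits latest seen bits seq_bits out) := by unfold Spec_update_ack_bits; infer_instance

-- ===== CLAIM (what is proved, stated in full; the proofs are below) =====
def Claim_equal_update_ack_bits : Prop := ∀ (latest : Int) (seen : List Int) (bits : Int) (seq_bits : Int), Dom_update_ack_bits latest seen bits seq_bits → Pre_update_ack_bits latest seen bits seq_bits → Spec_update_ack_bits latest seen bits seq_bits (update_ack_bits latest seen bits seq_bits)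

-- ===== LEMMAS AND PROOFS =====

-- Python's  a & (2^n - 1)  is  a mod 2^n  (also for negative a).
lemma pv_band_mask (a : Int) (n : Nat) :
    PySem.Int.band a ((2:Int)^n - 1) = a % (2:Int)^n := by
  have hN : (0:Int) < 2^n := by positivity
  have hNn : (1:Nat) ≤ 2^n := Nat.one_le_two_pow
  have hcast : ((2:Int)^n - 1) = ((2^n - 1 : Nat) : Int) := by push_cast [hNn]; ring
  by_cases ha : 0 ≤ a
  · obtain ⟨m, rfl⟩ : ∃ m : Nat, a = (m : Int) := ⟨a.toNat, (Int.toNat_of_nonneg ha).symm⟩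
    rw [hcast, PySem.Int.band_natCast, Nat.and_two_pow_sub_one_eq_mod]
    push_cast
    rfl
  · set m : Nat := (-a - 1).toNat with hm
    have ham : a = -((m : Int) + 1) := by omega
    have hband : PySem.Int.band a ((2:Int)^n - 1)
        = ((2^n - 1 - ((2^n - 1) &&& m) : Nat) : Int) := by
      unfold PySem.Int.band
      rw [if_neg ha, if_pos (by omega : (0:Int) ≤ (2:Int)^n - 1)]
      have h1 : ((2:Int)^n - 1).toNat = 2^n - 1 := by
        rw [hcast]; exact Int.toNat_natCast _
      rw [h1]
    rw [hband, Nat.and_comm, Nat.and_two_pow_sub_one_eq_mod]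
    have hmm : m % 2^n < 2^n := Nat.mod_lt _ (by positivity)
    have hsub : ((2^n - 1 - m % 2^n : Nat) : Int) = ((2^n : Nat) : Int) - 1 - ((m % 2^n : Nat) : Int) := by
      have hle : m % 2^n ≤ 2^n - 1 := by omega
      push_cast [hle, hNn]
      ring
    have hdvd : (2:Int)^n ∣ (a - ((2^n - 1 - m % 2^n : Nat) : Int)) := by
      refine ⟨-(((m / 2^n : Nat) : Int)) - 1, ?_⟩
      have hdm := Nat.div_add_mod m (2^n)
      have hdmi : ((2^n : Nat) : Int) * ((m / 2^n : Nat) : Int) + ((m % 2^n : Nat) : Int) = (m : Int) := by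
        exact_mod_cast congrArg (Nat.cast : Nat → Int) hdm
      rw [ham, hsub]
      push_cast at hdmi ⊢
      linarith
    have h2 : ((2^n - 1 - m % 2^n : Nat) : Int) % 2^n = ((2^n - 1 - m % 2^n : Nat) : Int) := by
      apply Int.emod_eq_of_lt (by positivity)
      have hlt : (2^n - 1 - m % 2^n : Nat) < 2^n := by omega
      calc ((2^n - 1 - m % 2^n : Nat) : Int) < ((2^n : Nat) : Int) := by exact_mod_cast hlt
        _ = (2:Int)^n := by push_cast; ring
    have h3 : a % 2^n = ((2^n - 1 - m % 2^n : Nat) : Int) % 2^n := by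
      rw [Int.emod_eq_emod_iff_emod_sub_eq_zero]
      exact Int.emod_eq_zero_of_dvd hdvd
    rw [h3, h2]

-- core congruence fact: with 1 ≤ i0 ≤ P and P ∣ y - i0,  P ∣ y - K  ↔  i0 ≤ K ∧ P ∣ K - i0  (for K ≥ 1)
lemma pv_hit_iff (P K y i0 : Int) (hP : 0 < P) (hK : 1 ≤ K)
    (h1 : 1 ≤ i0) (h2 : i0 ≤ P) (hc : P ∣ (y - i0)) :
    P ∣ (y - K) ↔ (i0 ≤ K ∧ P ∣ (K - i0)) := by
  constructor
  · intro h
    have hd : P ∣ (K - i0) := by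
      have h' := dvd_sub hc h
      have he : y - i0 - (y - K) = K - i0 := by ring
      rwa [he] at h'
    refine ⟨?_, hd⟩
    obtain ⟨m, hmEq⟩ := hd
    by_cases hm0 : 0 ≤ m
    · have : 0 ≤ P * m := mul_nonneg hP.le hm0
      linarith
    · have : P * m ≤ P * (-1) := mul_le_mul_of_nonneg_left (by omega) hP.le
      linarith
  · rintro ⟨-, hd⟩
    have h' := dvd_sub hc hd
    have he : y - i0 - (K - i0) = y - K := by ring
    rwa [he] at h'

-- A's per-position hit condition, translated to B's per-element offset condition
lemma pv_cond_iff (latest x K : Int) (n : Nat) (hK : 1 ≤ K) :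
    (PySem.Int.band (latest - K) ((2:Int)^n - 1) = PySem.Int.band x ((2:Int)^n - 1))
    ↔ ((if PySem.Int.band (latest - x) ((2:Int)^n - 1) = 0 then (2:Int)^n
          else PySem.Int.band (latest - x) ((2:Int)^n - 1)) ≤ K ∧
        (2:Int)^n ∣ (K - (if PySem.Int.band (latest - x) ((2:Int)^n - 1) = 0 then (2:Int)^n
          else PySem.Int.band (latest - x) ((2:Int)^n - 1)))) := by
  have hP : (0:Int) < 2^n := by positivity
  rw [pv_band_mask, pv_band_mask, pv_band_mask]
  set y : Int := latest - x with hy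
  set r : Int := y % 2^n with hr
  have hr0 : 0 ≤ r := Int.emod_nonneg _ (by positivity)
  have hrP : r < 2^n := Int.emod_lt_of_pos _ hP
  set i0 : Int := if r = 0 then (2:Int)^n else r with hi0
  have h1 : 1 ≤ i0 := by rw [hi0]; split <;> omega
  have h2 : i0 ≤ 2^n := by rw [hi0]; split <;> omega
  have hc : (2:Int)^n ∣ (y - i0) := by
    rw [hi0]
    split
    · rename_i h0
      have hdy : (2:Int)^n ∣ y := Int.dvd_of_emod_eq_zero (by rw [← hr]; exact h0)
      have := dvd_sub hdy (dvd_refl ((2:Int)^n))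
      exact this
    · refine ⟨y / 2^n, ?_⟩
      have := Int.ediv_add_emod y (2^n)
      rw [← hr] at this
      linarith
  have hA : ((latest - K) % 2^n = x % 2^n) ↔ (2:Int)^n ∣ (y - K) := by
    rw [Int.emod_eq_emod_iff_emod_sub_eq_zero]
    constructor
    · intro h
      have := Int.dvd_of_emod_eq_zero h
      have he : latest - K - x = y - K := by rw [hy]; ring
      rwa [he] at this
    · intro h
      apply Int.emod_eq_zero_of_dvd
      have he : y - K = latest - K - x := by rw [hy]; ring
      rwa [he] at h
  rw [hA]
  exact pv_hit_iff ((2:Int)^n) K y i0 hP hK h1 h2 hc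

-- characterisation of B's inner while loop, at the level of bits of a Nat accumulator
lemma markFrom_spec (bits period : Int) (hp : 0 < period) :
    ∀ (fuel : Nat) (i : Int), (bits + 1 - i).toNat ≤ fuel → 1 ≤ i → ∀ (w : Nat),
    ∃ w' : Nat, markFrom bits period i (w : Int) = (w' : Int) ∧ ∀ k : Nat,
      w'.testBit k = (w.testBit k ||
        (decide ((k:Int) + 1 ≤ bits) && decide (i ≤ (k:Int) + 1) && decide (period ∣ ((k:Int) + 1 - i)))) := by
  intro fuel
  induction fuel with
  | zero =>
    intro i hle hi w
    have hib : ¬ (i ≤ bits) := by omega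
    refine ⟨w, by rw [markFrom]; simp [hib], fun k => ?_⟩
    have hno : ¬ (((k:Int) + 1 ≤ bits) ∧ (i ≤ (k:Int) + 1)) := by omega
    by_cases hb : ((k:Int) + 1 ≤ bits) <;> by_cases hc : (i ≤ (k:Int) + 1) <;>
      simp [hb, hc] at hno ⊢
  | succ n ih =>
    intro i hle hi w
    by_cases hib : i ≤ bits
    · have hbor : PySem.Int.bor (w : Int) (1 <<< (i - 1).toNat) = ((w ||| 2^(i-1).toNat : Nat) : Int) := by
        rw [Nat.one_shiftLeft, PySem.Int.bor_natCast]
      obtain ⟨w', hw', hbit⟩ := ih (i + period) (by omega) (by omega) (w ||| 2^(i-1).toNat)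
      refine ⟨w', ?_, fun k => ?_⟩
      · rw [markFrom]
        simp only [hib, hp, and_self, dite_true]
        rw [hbor, hw']
      · rw [hbit k, Nat.testBit_lor, Nat.testBit_two_pow]
        by_cases hk : (k:Int) + 1 = i
        · have hKi : ((i - 1).toNat = k) := by omega
          have hd0 : period ∣ ((k:Int) + 1 - i) := by rw [hk]; simp
          have hb : ((k:Int) + 1 ≤ bits) := by omega
          have hge : i ≤ (k:Int) + 1 := by omega
          simp [hKi, hd0, hb, hge]
        · have hKik : ¬ ((i-1).toNat = k) := by omega
          simp only [hKik, decide_false, Bool.or_false]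
          rw [Bool.eq_iff_iff]
          simp only [Bool.or_eq_true, Bool.and_eq_true, decide_eq_true_eq]
          constructor
          · rintro (h | ⟨⟨hb, hge⟩, hd⟩)
            · exact Or.inl h
            · refine Or.inr ⟨⟨hb, by omega⟩, ?_⟩
              have h' := dvd_add hd (dvd_refl period)
              have he : (k:Int) + 1 - (i + period) + period = (k:Int) + 1 - i := by ring
              rwa [he] at h'
          · rintro (h | ⟨⟨hb, hge⟩, hd⟩)
            · exact Or.inl h
            · have hlt : i < (k:Int) + 1 := by
                rcases lt_or_eq_of_le hge with h' | h'
                · exact h'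
                · exact absurd h'.symm hk
              have hple : period ≤ (k:Int) + 1 - i := Int.le_of_dvd (by omega) hd
              refine Or.inr ⟨⟨hb, by omega⟩, ?_⟩
              have h' := dvd_sub hd (dvd_refl period)
              have he : (k:Int) + 1 - i - period = (k:Int) + 1 - (i + period) := by ring
              rwa [he] at h'
    · refine ⟨w, by rw [markFrom]; simp [hib], fun k => ?_⟩
      have hno : ¬ (((k:Int) + 1 ≤ bits) ∧ (i ≤ (k:Int) + 1)) := by omega
      by_cases hb : ((k:Int) + 1 ≤ bits) <;> by_cases hc : (i ≤ (k:Int) + 1) <;>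
        simp [hb, hc] at hno ⊢

-- characterisation of B's fold over `seen`
lemma foldB_spec (latest bits : Int) (n : Nat) (l : List Int) :
    ∀ (w : Nat),
    ∃ w' : Nat, (l.foldl (fun window x =>
        let i := PySem.Int.band (latest - x) ((2:Int)^n - 1)
        markFrom bits ((2:Int)^n) (if i = 0 then (2:Int)^n else i) window) (w : Int)) = (w' : Int) ∧
      ∀ k : Nat, w'.testBit k = (w.testBit k || l.any (fun x =>
        decide ((k:Int) + 1 ≤ bits) &&
        decide ((if PySem.Int.band (latest - x) ((2:Int)^n - 1) = 0 then (2:Int)^n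
            else PySem.Int.band (latest - x) ((2:Int)^n - 1)) ≤ (k:Int) + 1) &&
        decide ((2:Int)^n ∣ ((k:Int) + 1 -
          (if PySem.Int.band (latest - x) ((2:Int)^n - 1) = 0 then (2:Int)^n
            else PySem.Int.band (latest - x) ((2:Int)^n - 1)))))) := by
  have hP : (0:Int) < 2^n := by positivity
  induction l with
  | nil => exact fun w => ⟨w, rfl, fun k => by simp⟩
  | cons x l ihl =>
    intro w
    have hi_mod : PySem.Int.band (latest - x) ((2:Int)^n - 1) = (latest - x) % 2^n := pv_band_mask _ n
    have hi0 : 0 ≤ PySem.Int.band (latest - x) ((2:Int)^n - 1) := by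
      rw [hi_mod]; exact Int.emod_nonneg _ (by positivity)
    have h1 : 1 ≤ (if PySem.Int.band (latest - x) ((2:Int)^n - 1) = 0 then (2:Int)^n
        else PySem.Int.band (latest - x) ((2:Int)^n - 1)) := by split <;> omega
    obtain ⟨w1, hw1, hbit1⟩ := markFrom_spec bits ((2:Int)^n) hP
      (bits + 1 - (if PySem.Int.band (latest - x) ((2:Int)^n - 1) = 0 then (2:Int)^n
        else PySem.Int.band (latest - x) ((2:Int)^n - 1))).toNat
      (if PySem.Int.band (latest - x) ((2:Int)^n - 1) = 0 then (2:Int)^n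
        else PySem.Int.band (latest - x) ((2:Int)^n - 1)) le_rfl h1 w
    obtain ⟨w', hw', hbit⟩ := ihl w1
    refine ⟨w', ?_, fun k => ?_⟩
    · rw [List.foldl_cons]
      simp only []
      rw [hw1, hw']
    · rw [hbit k, hbit1 k, List.any_cons]
      simp only [Bool.or_assoc]

-- characterisation of A's fold over range(1, bits+1)
lemma foldA_spec (latest bits mask : Int) (S : PySem.Set Int) :
    ∀ (fuel : Nat) (a : Int), (bits + 1 - a).toNat ≤ fuel → 1 ≤ a → ∀ (w : Nat),
    ∃ w' : Nat, ((PySem.List.pyRange a (bits + 1) 1).foldl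
        (fun window i =>
          let s := PySem.Int.band (latest - i) mask
          if s ∈ S then PySem.Int.bor window (1 <<< (i - 1).toNat) else window) (w : Int)) = (w' : Int) ∧
      ∀ k : Nat, w'.testBit k = (w.testBit k ||
        (decide (a ≤ (k:Int) + 1) && decide ((k:Int) + 1 ≤ bits) &&
          decide (PySem.Int.band (latest - ((k:Int) + 1)) mask ∈ S))) := by
  intro fuel
  induction fuel with
  | zero =>
    intro a hle ha w
    have hnil : PySem.List.pyRange a (bits + 1) 1 = [] := PySem.List.pyRange_one_eq_nil (by omega)
    refine ⟨w, by rw [hnil]; rfl, fun k => ?_⟩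
    have hno : ¬ ((a ≤ (k:Int) + 1) ∧ ((k:Int) + 1 ≤ bits)) := by omega
    by_cases hb : (a ≤ (k:Int) + 1) <;> by_cases hc : ((k:Int) + 1 ≤ bits) <;>
      simp [hb, hc] at hno ⊢
  | succ n ih =>
    intro a hle ha w
    by_cases hab : a ≤ bits
    · rw [PySem.List.pyRange_one_cons (by omega : a < bits + 1), List.foldl_cons]
      by_cases hmem : PySem.Int.band (latest - a) mask ∈ S
      · obtain ⟨w', hw', hbit⟩ := ih (a + 1) (by omega) (by omega) (w ||| 2^(a-1).toNat)
        refine ⟨w', ?_, fun k => ?_⟩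
        · simp only []
          rw [if_pos hmem]
          have hbor : PySem.Int.bor (w : Int) (((1 <<< (a - 1).toNat : Nat)) : Int) = ((w ||| 2^(a-1).toNat : Nat) : Int) := by
            rw [Nat.one_shiftLeft, PySem.Int.bor_natCast]
          rw [hbor, hw']
        · rw [hbit k, Nat.testBit_lor, Nat.testBit_two_pow]
          by_cases hk : (k:Int) + 1 = a
          · have hKi : ((a - 1).toNat = k) := by omega
            have hb : ((k:Int) + 1 ≤ bits) := by omega
            have hmem' : PySem.Int.band (latest - ((k:Int) + 1)) mask ∈ S := by rw [hk]; exact hmem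
            have hge : a ≤ (k:Int) + 1 := by omega
            simp [hKi, hb, hmem', hge]
          · have hKik : ¬ ((a-1).toNat = k) := by omega
            simp only [hKik, decide_false, Bool.or_false]
            rw [Bool.eq_iff_iff]
            simp only [Bool.or_eq_true, Bool.and_eq_true, decide_eq_true_eq]
            constructor
            · rintro (h | ⟨⟨h1, h2⟩, h3⟩)
              · exact Or.inl h
              · exact Or.inr ⟨⟨by omega, h2⟩, h3⟩
            · rintro (h | ⟨⟨h1, h2⟩, h3⟩)
              · exact Or.inl h
              · exact Or.inr ⟨⟨by omega, h2⟩, h3⟩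
      · obtain ⟨w', hw', hbit⟩ := ih (a + 1) (by omega) (by omega) w
        refine ⟨w', ?_, fun k => ?_⟩
        · simp only []
          rw [if_neg hmem, hw']
        · rw [hbit k]
          by_cases hk : (k:Int) + 1 = a
          · have hmem' : ¬ (PySem.Int.band (latest - ((k:Int) + 1)) mask ∈ S) := by rw [hk]; exact hmem
            have hnge : ¬ (a + 1 ≤ (k:Int) + 1) := by omega
            simp [hmem', hnge]
          · rw [Bool.eq_iff_iff]
            simp only [Bool.or_eq_true, Bool.and_eq_true, decide_eq_true_eq]
            constructor
            · rintro (h | ⟨⟨h1, h2⟩, h3⟩)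
              · exact Or.inl h
              · exact Or.inr ⟨⟨by omega, h2⟩, h3⟩
            · rintro (h | ⟨⟨h1, h2⟩, h3⟩)
              · exact Or.inl h
              · exact Or.inr ⟨⟨by omega, h2⟩, h3⟩
    · have hnil : PySem.List.pyRange a (bits + 1) 1 = [] := PySem.List.pyRange_one_eq_nil (by omega)
      refine ⟨w, by rw [hnil]; rfl, fun k => ?_⟩
      have hno : ¬ ((a ≤ (k:Int) + 1) ∧ ((k:Int) + 1 ≤ bits)) := by omega
      by_cases hb : (a ≤ (k:Int) + 1) <;> by_cases hc : ((k:Int) + 1 ≤ bits) <;>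
        simp [hb, hc] at hno ⊢

-- ===== VERDICT (by name: the statement is the Claim_ definition above) =====
theorem update_ack_bits_spec : Claim_equal_update_ack_bits := by
  intro latest seen bits seq_bits _hDom _hPre
  unfold Spec_update_ack_bits
  set n : Nat := seq_bits.toNat with hn
  have hP : (0:Int) < 2^n := by positivity
  have hsh2 : ((1 <<< seq_bits.toNat : Nat) : Int) = (2:Int)^n := by
    rw [Nat.one_shiftLeft]; rw [hn]; push_cast; ring
  obtain ⟨wA, hwA, hbitA⟩ := foldA_spec latest bits ((2:Int)^n - 1)
    (PySem.Set.ofList (seen.map (fun x => PySem.Int.band x ((2:Int)^n - 1))))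
    (bits + 1 - 1).toNat 1 le_rfl le_rfl 0
  obtain ⟨wB, hwB, hbitB⟩ := foldB_spec latest bits n seen 0
  have eA : update_ack_bits latest seen bits seq_bits = (wA : Int) := by
    simp only [update_ack_bits, hsh2]
    exact hwA
  have eB : update_ack_bits_alt latest seen bits seq_bits = (wB : Int) := by
    simp only [update_ack_bits_alt, hsh2]
    exact hwB
  rw [eA, eB]
  congr 1
  apply Nat.eq_of_testBit_eq
  intro k
  rw [hbitA k, hbitB k]
  simp only [Nat.zero_testBit, Bool.false_or]
  rw [Bool.eq_iff_iff]
  simp only [Bool.and_eq_true, decide_eq_true_eq, List.any_eq_true,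
    PySem.Set.mem_ofList, List.mem_map]
  constructor
  · rintro ⟨⟨-, hKb⟩, x, hx, hxeq⟩
    obtain ⟨hle, hdvd⟩ := (pv_cond_iff latest x ((k:Int) + 1) n (by omega)).mp hxeq.symm
    exact ⟨x, hx, ⟨hKb, hle⟩, hdvd⟩
  · rintro ⟨x, hx, ⟨hKb, hle⟩, hdvd⟩
    exact ⟨⟨by omega, hKb⟩, x, hx,
      ((pv_cond_iff latest x ((k:Int) + 1) n (by omega)).mpr ⟨hle, hdvd⟩).symm⟩
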